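-- pv_equiv track=rewrite | github.com/ijustlovemath/lexical_bot_detection | detector.py | is_bot
-- ===== SOURCE A (Python) =====
-- def k_strings(string, k=3):
--     '''generate all length k subsequences of string'''
--     if k > len(string):
--         raise ValueError("unable to compute k-strings for strings with length less than k")
--
--     n = len(string) - k + 1
--
--     return [string[i:i+k] for i in range(n)]
--
-- def rolling_hash(message, message_id, k=3):
--     '''compute rolling hash of all k-substrings of message'''
--     dictionary = {}
--     for s in k_strings(message, k):
--         dictionary[s] = (message, message_id)
--     return dictionary
--
-- def common_phrases(messages, k):
--     phrases = None
--     for message in messages: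
--         keys = set(rolling_hash(message, 0, k).keys())
--         if phrases is None:
--             phrases = keys
--         else:
--             phrases.intersection_update(keys)
--
--     return phrases
--
-- def all_equal(iterator):
--     iterator = iter(iterator)
--
--     try:
--         first = next(iterator)
--     except StopIteration:
--         return True
--     return all(first == rest for rest in iterator)
--
-- def is_bot(bot_posts, minimum_phrase_length=10, maximum_post_length=50):
--     ''' generate all common phrases from 10 to the length of the minimum post
--     Looks like this essentially gets the longest phrases possible'''
--     score = 0.0
--     minimum_phrase_length = 10
--
--     # trivial check for silly bots
--     if all_equal(bot_posts):
--         return True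
--
--     latest_phrases = set()
--     bot_posts = [post for post in bot_posts if len(post) > minimum_phrase_length]
--     minimum_post_length = min(len(post) for post in bot_posts)
--     minimum_post_length = min(minimum_post_length, maximum_post_length)
--     if minimum_post_length < minimum_phrase_length + 1:
--         raise ValueError
--     for k in range(minimum_post_length, minimum_phrase_length, -1):
--         phrases = common_phrases(bot_posts, k)
--         if phrases != set():
--             latest_phrases = phrases
--         score += len(phrases)
--         for post in bot_posts:
--             for phrase in latest_phrases:
--                 if post.endswith(phrase) or post.startswith(phrase):
--                     return True
--
--     return False
-- ===== SOURCE B (Python) =====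
-- def is_bot(bot_posts, minimum_phrase_length=10, maximum_post_length=50):
--     '''A phrase of length k >= 11 common to all posts and bounding some post
--     yields its length-11 prefix/suffix with the same property, so only k = 11
--     ever needs to be examined: one pass building 11-gram sets instead of a
--     loop over every length.'''
--     if not bot_posts:
--         return True
--     first = bot_posts[0]
--     if all(post == first for post in bot_posts[1:]):
--         return True
--     k = 11
--     posts = [post for post in bot_posts if len(post) > 10]
--     if not posts or maximum_post_length < k:
--         raise ValueError
--     common = None
--     for post in posts:
--         grams = {post[i:i+k] for i in range(len(post) - k + 1)}
--         common = grams if common is None else common & grams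
--     return any(post[:k] in common or post[-k:] in common for post in posts)
-- ===== Notes on version B (the rewrite author's own statement) =====
-- stated objective: alternative
-- what changed: B replaces A's loop over every phrase length k from the minimum post length down to 11 (building a common-substring set per k) by a single pass at k = 11, since a common length-k phrase that starts/ends a post yields a common length-11 phrase that does too.
import Mathlib
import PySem

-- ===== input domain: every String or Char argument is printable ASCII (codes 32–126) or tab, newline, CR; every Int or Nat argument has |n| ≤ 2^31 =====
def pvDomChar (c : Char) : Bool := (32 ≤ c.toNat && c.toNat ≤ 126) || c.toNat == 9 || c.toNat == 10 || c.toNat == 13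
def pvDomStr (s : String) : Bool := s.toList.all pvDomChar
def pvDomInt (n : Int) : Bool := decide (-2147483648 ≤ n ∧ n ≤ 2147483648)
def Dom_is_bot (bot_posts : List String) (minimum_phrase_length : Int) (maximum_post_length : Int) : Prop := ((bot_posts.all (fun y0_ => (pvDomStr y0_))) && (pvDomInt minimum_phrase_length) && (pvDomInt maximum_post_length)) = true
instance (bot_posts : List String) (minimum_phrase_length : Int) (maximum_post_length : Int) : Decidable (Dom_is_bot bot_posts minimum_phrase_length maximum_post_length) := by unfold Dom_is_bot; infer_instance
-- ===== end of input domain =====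

-- B replaces A's loop over every phrase length k = min_len … 11 by the single length k = 11
-- (a common length-k prefix/suffix phrase yields a common length-11 one), one pass over the posts.
-- Equivalence is about the RETURN value on Pre_ (= the inputs where A returns; both raise elsewhere).

-- ===== PORT A =====
def kStringsA (s : String) (k : Int) : List String :=
  -- k > len(s) raises in Python; that call never happens on Pre_ inputs
  (PySem.List.pyRange 0 ((PySem.Str.len s : Int) - k + 1) 1).map
    (fun i => PySem.Str.slice s (some i) (some (i + k)))

def rollingHashA (message : String) (messageId : Int) (k : Int) : PySem.Dict String (String × Int) :=
  (kStringsA message k).foldl (fun d s => d.insert s (message, messageId)) PySem.Dict.empty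

def commonPhrasesA (messages : List String) (k : Int) : Option (PySem.Set String) :=
  messages.foldl
    (fun phrases message =>
      let keys := PySem.Set.ofList (rollingHashA message 0 k).keys
      match phrases with
      | none => some keys
      | some p => some (PySem.Set.inter p keys))
    none

def allEqualA (xs : List String) : Bool :=
  match xs with
  | [] => true
  | first :: rest => rest.all (fun r => first == r)

def botCheckA (posts : List String) (latest : PySem.Set String) : Bool :=
  posts.any (fun post => latest.any (fun phrase =>
    PySem.Str.endswith post phrase || PySem.Str.startswith post phrase))

def botLoopA (posts : List String) (latest : PySem.Set String) : List Int → Bool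
  | [] => false
  | k :: ks =>
    match commonPhrasesA posts k with
    | none => false   -- Python: len(None) raises; unreachable (posts nonempty on Pre_)
    | some phrases =>
      let latest := if PySem.Set.equal phrases PySem.Set.empty then latest else phrases
      if botCheckA posts latest then true else botLoopA posts latest ks

def is_bot (bot_posts : List String) (minimum_phrase_length : Int) (maximum_post_length : Int) : Bool :=
  let minimum_phrase_length : Int := 10
  if allEqualA bot_posts then true
  else
    let posts := bot_posts.filter (fun post => minimum_phrase_length < (PySem.Str.len post : Int))
    match PySem.List.min? (posts.map (fun p => (PySem.Str.len p : Int))) (fun x => x) with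
    | none => false    -- Python: min() over an empty sequence raises ValueError (outside Pre_)
    | some m0 =>
      let m := min m0 maximum_post_length
      if m < minimum_phrase_length + 1 then false   -- Python: raise ValueError (outside Pre_)
      else botLoopA posts PySem.Set.empty (PySem.List.pyRange m minimum_phrase_length (-1))

-- ===== PORT B =====
def gramsB (post : String) (k : Int) : PySem.Set String :=
  PySem.Set.ofList ((PySem.List.pyRange 0 ((PySem.Str.len post : Int) - k + 1) 1).map
    (fun i => PySem.Str.slice post (some i) (some (i + k))))

def commonB (posts : List String) (k : Int) : Option (PySem.Set String) :=
  posts.foldl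
    (fun common post =>
      match common with
      | none => some (gramsB post k)
      | some c => some (PySem.Set.inter c (gramsB post k)))
    none

def is_bot_alt (bot_posts : List String) (minimum_phrase_length : Int) (maximum_post_length : Int) : Bool :=
  match bot_posts with
  | [] => true
  | first :: rest =>
    if rest.all (fun post => post == first) then true
    else
      let k : Int := 11
      let posts := bot_posts.filter (fun post => 10 < (PySem.Str.len post : Int))
      if posts.isEmpty || maximum_post_length < k then false   -- Python B: raise ValueError (outside Pre_)
      else
        match commonB posts k with
        | none => false   -- unreachable: posts nonempty
        | some common =>
          posts.any (fun post =>
            PySem.Set.contains common (PySem.Str.slice post none (some k)) ||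
            PySem.Set.contains common (PySem.Str.slice post (some (-k)) none))

-- ===== PRECONDITION & SPEC =====
-- Pre_ excludes exactly the inputs on which A raises ValueError: the not-all-equal lists with
-- no post longer than 10 characters, and those with maximum_post_length < 11.
def Pre_is_bot (bot_posts : List String) (minimum_phrase_length : Int) (maximum_post_length : Int) : Prop :=
  (∀ x ∈ bot_posts, ∀ y ∈ bot_posts, x = y) ∨
  ((∃ p ∈ bot_posts, 10 < p.length) ∧ 11 ≤ maximum_post_length)
instance (bot_posts : List String) (minimum_phrase_length : Int) (maximum_post_length : Int) : Decidable (Pre_is_bot bot_posts minimum_phrase_length maximum_post_length) := by unfold Pre_is_bot; infer_instance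

def pvWitness_is_bot : List String × Int × Int := (["hello world from x", "ahello worldb"], 10, 50)

def Spec_is_bot (bot_posts : List String) (minimum_phrase_length : Int) (maximum_post_length : Int) (out : Bool) : Prop := out = is_bot_alt bot_posts minimum_phrase_length maximum_post_length
instance (bot_posts : List String) (minimum_phrase_length : Int) (maximum_post_length : Int) (out : Bool) : Decidable (Spec_is_bot bot_posts minimum_phrase_length maximum_post_length out) := by unfold Spec_is_bot; infer_instance

-- ===== CLAIM (what is proved, stated in full; the proofs are below) =====
def Claim_equal_is_bot : Prop := ∀ (bot_posts : List String) (minimum_phrase_length : Int) (maximum_post_length : Int), Dom_is_bot bot_posts minimum_phrase_length maximum_post_length → Pre_is_bot bot_posts minimum_phrase_length maximum_post_length → Spec_is_bot bot_posts minimum_phrase_length maximum_post_length (is_bot bot_posts minimum_phrase_length maximum_post_length)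


-- ===== LEMMAS AND PROOFS =====

theorem str_toList_inj {s t : String} (h : s.toList = t.toList) : s = t := by
  have := congrArg String.ofList h
  simpa [String.ofList_toList] using this

theorem slice_window (s : String) (i k : Int) (hi : 0 ≤ i) (hk : 0 ≤ k) :
    (PySem.Str.slice s (some i) (some (i + k))).toList = (s.toList.drop i.toNat).take k.toNat := by
  rw [PySem.Str.toList_slice, PySem.Chars.slice_eq_listSlice, PySem.List.slice_toNat s.toList hi (by omega)]
  congr 1
  omega

theorem mem_kStringsA (s : String) (k : Int) (h1 : 1 ≤ k) (h2 : k ≤ (s.toList.length : Int)) (t : String) :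
    t ∈ kStringsA s k ↔ t.toList.length = k.toNat ∧ t.toList <:+: s.toList := by
  have hlenS : ((PySem.Str.len s : Int)) = (s.toList.length : Int) := by simp
  constructor
  · intro hmem
    obtain ⟨i, hi, rfl⟩ := List.mem_map.mp hmem
    rw [PySem.List.mem_pyRange_one, hlenS] at hi
    obtain ⟨hi0, hi1⟩ := hi
    have hw := slice_window s i k hi0 (by omega)
    constructor
    · rw [hw]
      simp only [List.length_take, List.length_drop]
      omega
    · rw [hw]
      exact ((List.take_prefix _ _).isInfix).trans ((List.drop_suffix _ _).isInfix)
  · rintro ⟨hlen, hinf⟩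
    obtain ⟨pre, suf, hd⟩ := hinf
    refine List.mem_map.mpr ⟨(pre.length : Int), ?_, ?_⟩
    · rw [PySem.List.mem_pyRange_one, hlenS]
      have : pre.length + t.toList.length + suf.length = s.toList.length := by
        rw [← hd]; simp; omega
      omega
    · symm
      apply str_toList_inj
      rw [slice_window s _ k (by positivity) (by omega)]
      rw [Int.toNat_natCast, ← hd, ← hlen]
      rw [List.append_assoc, List.drop_left, List.take_left]

theorem gramsB_eq (s : String) (k : Int) : gramsB s k = PySem.Set.ofList (kStringsA s k) := rfl

theorem keys_rollingHashA (m : String) (id : Int) (k : Int) :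
    PySem.Set.ofList (rollingHashA m id k).keys = gramsB m k := by
  unfold rollingHashA
  rw [PySem.Dict.keys_foldl_insert_key (key := fun s => s) (f := fun _ _ => (m, id))]
  simp [PySem.Dict.keys_empty, PySem.Set.update_nil_left, PySem.Set.ofList_ofList, gramsB_eq]

theorem commonPhrasesA_eq_commonB (ms : List String) (k : Int) :
    commonPhrasesA ms k = commonB ms k := by
  unfold commonPhrasesA commonB
  congr 1
  funext phrases message
  rw [keys_rollingHashA]

theorem foldl_some (k : Int) (l : List String) (c : PySem.Set String) :
    l.foldl (fun common post =>
        match common with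
        | none => some (gramsB post k)
        | some c => some (PySem.Set.inter c (gramsB post k))) (some c)
      = some (l.foldl (fun c q => PySem.Set.inter c (gramsB q k)) c) := by
  induction l generalizing c with
  | nil => rfl
  | cons q l ih => simpa using ih (PySem.Set.inter c (gramsB q k))

theorem commonB_cons (p : String) (ps : List String) (k : Int) :
    commonB (p :: ps) k = some (ps.foldl (fun c q => PySem.Set.inter c (gramsB q k)) (gramsB p k)) := by
  unfold commonB
  rw [List.foldl_cons]
  exact foldl_some k ps (gramsB p k)

theorem mem_foldl_inter (k : Int) (t : String) (l : List String) (c : PySem.Set String) :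
    t ∈ l.foldl (fun c q => PySem.Set.inter c (gramsB q k)) c ↔ t ∈ c ∧ ∀ q ∈ l, t ∈ gramsB q k := by
  induction l generalizing c with
  | nil => simp
  | cons q l ih =>
    rw [List.foldl_cons, ih]
    simp only [PySem.Set.mem_inter, List.mem_cons]
    constructor
    · rintro ⟨⟨h1, h2⟩, h3⟩
      exact ⟨h1, fun r hr => hr.elim (fun e => e ▸ h2) (h3 r)⟩
    · rintro ⟨h1, h2⟩
      exact ⟨⟨h1, h2 q (Or.inl rfl)⟩, fun r hr => h2 r (Or.inr hr)⟩

theorem mem_commonB {p : String} {ps : List String} {k : Int} {S : PySem.Set String} {t : String}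
    (h : commonB (p :: ps) k = some S) :
    t ∈ S ↔ ∀ q ∈ p :: ps, t ∈ kStringsA q k := by
  rw [commonB_cons] at h
  obtain rfl : _ = S := Option.some.inj h
  rw [mem_foldl_inter]
  simp only [gramsB_eq, PySem.Set.mem_ofList, List.mem_cons]
  constructor
  · rintro ⟨h1, h2⟩ q hq
    exact hq.elim (fun e => e ▸ h1) (h2 q)
  · intro hall
    exact ⟨hall p (Or.inl rfl), fun q hq => hall q (Or.inr hq)⟩

theorem equal_empty_iff (s : PySem.Set String) : PySem.Set.equal s PySem.Set.empty = true ↔ s = [] := by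
  constructor
  · intro h
    simp only [PySem.Set.equal, Bool.and_eq_true] at h
    have h1 := (PySem.Set.issubset_iff _ _).mp h.1
    cases s with
    | nil => rfl
    | cons a t => exact absurd (h1 a (by simp)) (by simp [PySem.Set.empty])
  · intro h; subst h; rfl

theorem botCheckA_nil (posts : List String) : botCheckA posts [] = false := by
  simp [botCheckA]

theorem loopA_eq_any (posts : List String) (p0 : String) (ps0 : List String) (hps : posts = p0 :: ps0) :
    ∀ (ks : List Int) (latest : PySem.Set String), botCheckA posts latest = false →
      botLoopA posts latest ks = ks.any (fun k => botCheckA posts ((commonB posts k).getD [])) := by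
  intro ks
  induction ks with
  | nil => intro latest _; rfl
  | cons k ks ih =>
    intro latest hchk
    obtain ⟨S, hS⟩ : ∃ S, commonB posts k = some S := by
      rw [hps, commonB_cons]; exact ⟨_, rfl⟩
    rw [botLoopA, commonPhrasesA_eq_commonB, hS]
    simp only [List.any_cons, hS, Option.getD_some]
    by_cases hemp : S = []
    · subst hemp
      rw [if_pos ((equal_empty_iff []).mpr rfl), hchk, if_neg (by simp), botCheckA_nil, ih latest hchk]
      simp
    · have heqf : PySem.Set.equal S PySem.Set.empty = false := by
        cases h : PySem.Set.equal S PySem.Set.empty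
        · rfl
        · exact absurd ((equal_empty_iff S).mp h) hemp
      rw [heqf]
      cases hSc : botCheckA posts S with
      | true => simp [hSc]
      | false =>
        simp only [Bool.false_eq_true, if_false, hSc, ih S hSc]
        simp

theorem botCheckA_iff (posts : List String) (X : PySem.Set String) :
    botCheckA posts X = true ↔
      ∃ post ∈ posts, ∃ t ∈ X, (t.toList <:+ post.toList ∨ t.toList <+: post.toList) := by
  simp [botCheckA, List.any_eq_true, PySem.Chars.endswith_iff, PySem.Chars.startswith_iff]

theorem mono_trigger (posts : List String) (p0 : String) (ps0 : List String) (hps : posts = p0 :: ps0)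
    (k : Int) (hk : 11 ≤ k) (hlen : ∀ q ∈ posts, k ≤ (q.toList.length : Int))
    (htrig : botCheckA posts ((commonB posts k).getD []) = true) :
    botCheckA posts ((commonB posts 11).getD []) = true := by
  subst hps
  obtain ⟨S, hS⟩ : ∃ S, commonB (p0 :: ps0) k = some S := by rw [commonB_cons]; exact ⟨_, rfl⟩
  obtain ⟨S11, hS11⟩ : ∃ S, commonB (p0 :: ps0) 11 = some S := by rw [commonB_cons]; exact ⟨_, rfl⟩
  rw [hS, Option.getD_some, botCheckA_iff] at htrig
  rw [hS11, Option.getD_some, botCheckA_iff]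
  obtain ⟨post, hpost, t, htS, hcase⟩ := htrig
  have hall := (mem_commonB hS (t := t)).mp htS
  have hprops : ∀ q ∈ p0 :: ps0, t.toList.length = k.toNat ∧ t.toList <:+: q.toList := fun q hq =>
    (mem_kStringsA q k (by omega) (hlen q hq) t).mp (hall q hq)
  have hlt : t.toList.length = k.toNat := (hprops post hpost).1
  cases hcase with
  | inr hpre =>
    refine ⟨post, hpost, String.ofList (t.toList.take 11), ?_, Or.inr ?_⟩
    · apply (mem_commonB hS11).mpr
      intro q hq
      apply (mem_kStringsA q 11 (by omega) (le_trans hk (hlen q hq)) _).mpr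
      refine ⟨?_, ?_⟩
      · rw [String.toList_ofList, List.length_take]; omega
      · rw [String.toList_ofList]
        exact ((List.take_prefix _ _).isInfix).trans (hprops q hq).2
    · rw [String.toList_ofList]
      exact (List.take_prefix _ _).trans hpre
  | inl hsuf =>
    refine ⟨post, hpost, String.ofList (t.toList.drop (t.toList.length - 11)), ?_, Or.inl ?_⟩
    · apply (mem_commonB hS11).mpr
      intro q hq
      apply (mem_kStringsA q 11 (by omega) (le_trans hk (hlen q hq)) _).mpr
      refine ⟨?_, ?_⟩
      · rw [String.toList_ofList, List.length_drop]; omega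
      · rw [String.toList_ofList]
        exact ((List.drop_suffix _ _).isInfix).trans (hprops q hq).2
    · rw [String.toList_ofList]
      exact (List.drop_suffix _ _).trans hsuf

theorem check11_eq_B (posts : List String) (p0 : String) (ps0 : List String) (hps : posts = p0 :: ps0)
    (hlen : ∀ q ∈ posts, (11:Int) ≤ (q.toList.length : Int)) (S : PySem.Set String)
    (hS : commonB posts 11 = some S) :
    botCheckA posts S = posts.any (fun post =>
      PySem.Set.contains S (PySem.Str.slice post none (some 11)) ||
      PySem.Set.contains S (PySem.Str.slice post (some (-11)) none)) := by
  have hpref : ∀ post : String, (PySem.Str.slice post none (some 11)).toList = post.toList.take 11 := by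
    intro post
    rw [PySem.Str.toList_slice, PySem.Chars.slice_eq_listSlice,
      show ((11:Int)) = ((11:Nat):Int) by norm_num, PySem.List.slice_to_natCast]
  have hsuff : ∀ post : String,
      (PySem.Str.slice post (some (-11)) none).toList = post.toList.drop (post.toList.length - 11) := by
    intro post
    rw [PySem.Str.toList_slice, PySem.Chars.slice_eq_listSlice,
      PySem.List.slice_from_neg_ofNat _ 11 (by omega)]
  have hmem : ∀ t ∈ S, t.toList.length = 11 ∧ ∀ q ∈ posts, t.toList <:+: q.toList := by
    intro t ht
    subst hps
    have hall := (mem_commonB hS (t := t)).mp ht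
    have h0 := (mem_kStringsA p0 11 (by omega) (hlen p0 (by simp)) t).mp (hall p0 (by simp))
    refine ⟨h0.1, fun q hq => ((mem_kStringsA q 11 (by omega) (hlen q hq) t).mp (hall q hq)).2⟩
  rw [Bool.eq_iff_iff, botCheckA_iff, List.any_eq_true]
  constructor
  · rintro ⟨post, hpost, t, htS, hcase⟩
    refine ⟨post, hpost, ?_⟩
    rw [Bool.or_eq_true, PySem.Set.contains_iff, PySem.Set.contains_iff]
    obtain ⟨hl11, _⟩ := hmem t htS
    cases hcase with
    | inr hpre =>
      left
      have : (PySem.Str.slice post none (some 11)).toList = t.toList := by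
        rw [hpref post, List.prefix_iff_eq_take.mp hpre, hl11]
      exact (str_toList_inj this) ▸ htS
    | inl hsuf =>
      right
      have : (PySem.Str.slice post (some (-11)) none).toList = t.toList := by
        rw [hsuff post, List.suffix_iff_eq_drop.mp hsuf, hl11]
      exact (str_toList_inj this) ▸ htS
  · rintro ⟨post, hpost, hc⟩
    rw [Bool.or_eq_true, PySem.Set.contains_iff, PySem.Set.contains_iff] at hc
    cases hc with
    | inl hp =>
      exact ⟨post, hpost, _, hp, Or.inr (by rw [hpref post]; exact List.take_prefix _ _)⟩
    | inr hs =>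
      exact ⟨post, hpost, _, hs, Or.inl (by rw [hsuff post]; exact List.drop_suffix _ _)⟩

theorem allEqualA_of_pre (xs : List String) (h : ∀ x ∈ xs, ∀ y ∈ xs, x = y) : allEqualA xs = true := by
  cases xs with
  | nil => rfl
  | cons f r =>
    simp only [allEqualA, List.all_eq_true]
    intro x hx
    exact beq_iff_eq.mpr (h f (by simp) x (by simp [hx]))

theorem all_flip (f : String) (r : List String) :
    r.all (fun post => post == f) = r.all (fun x => f == x) := by
  rw [Bool.eq_iff_iff]
  simp only [List.all_eq_true, beq_iff_eq]
  constructor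
  · intro h x hx; exact (h x hx).symm
  · intro h x hx; exact (h x hx).symm

theorem str_len_int (s : String) : ((PySem.Str.len s : Int)) = (s.toList.length : Int) := by simp

theorem is_bot_main : ∀ (bot_posts : List String) (mpl mx : Int),
    Pre_is_bot bot_posts mpl mx → is_bot bot_posts mpl mx = is_bot_alt bot_posts mpl mx := by
  intro bp mpl mx hpre
  by_cases hall : allEqualA bp = true
  · rw [is_bot, if_pos hall]
    cases bp with
    | nil => rfl
    | cons f r =>
      rw [is_bot_alt, if_pos]
      rw [all_flip]
      simpa [allEqualA] using hall
  · have hallf : allEqualA bp = false := by revert hall; cases allEqualA bp <;> simp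
    have hex : (∃ p ∈ bp, 10 < p.length) ∧ 11 ≤ mx := by
      cases hpre with
      | inl h => exact absurd (allEqualA_of_pre bp h) (by simp [hallf])
      | inr h => exact h
    obtain ⟨⟨p1, hp1mem, hp1len⟩, hmx⟩ := hex
    cases bp with
    | nil => exact absurd hp1mem (by simp)
    | cons f r =>
      -- the filtered list and its facts
      have hp1' : (10:Int) < (PySem.Str.len p1 : Int) := by
        rw [str_len_int]
        have : p1.length = p1.toList.length := String.length_toList.symm
        omega
      have hp1posts : p1 ∈ (f :: r).filter (fun post => decide ((10:Int) < (PySem.Str.len post : Int))) :=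
        List.mem_filter.mpr ⟨hp1mem, by simpa using hp1'⟩
      obtain ⟨q0, qs0, hq⟩ := List.exists_cons_of_ne_nil (List.ne_nil_of_mem hp1posts)
      set posts := (f :: r).filter (fun post => decide ((10:Int) < (PySem.Str.len post : Int))) with hpostsdef
      obtain ⟨m0, hm0⟩ : ∃ m0,
          PySem.List.min? (posts.map (fun p => ((PySem.Str.len p : Int)))) (fun x => x) = some m0 := by
        cases h : PySem.List.min? (posts.map (fun p => ((PySem.Str.len p : Int)))) (fun x => x) with
        | none => rw [PySem.List.min?_eq_none_iff] at h; simp [hq] at h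
        | some m => exact ⟨m, rfl⟩
      have hm0mem := PySem.List.min?_mem hm0
      have hm0min := PySem.List.min?_isMin hm0
      have h11 : 11 ≤ m0 := by
        obtain ⟨q, hqmem, hqe⟩ := List.mem_map.mp hm0mem
        have hflt := (List.mem_filter.mp hqmem).2
        simp only [decide_eq_true_eq] at hflt
        omega
      have hlenq : ∀ q ∈ posts, m0 ≤ (q.toList.length : Int) := by
        intro q hq'
        have := hm0min _ (List.mem_map_of_mem hq')
        rwa [str_len_int] at this
      have h11len : ∀ q ∈ posts, (11:Int) ≤ (q.toList.length : Int) :=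
        fun q h => le_trans h11 (hlenq q h)
      obtain ⟨S11, hS11⟩ : ∃ S, commonB posts 11 = some S := by
        rw [hq, commonB_cons]; exact ⟨_, rfl⟩
      -- reduce A to the any-over-range form
      have hA : is_bot (f :: r) mpl mx = botCheckA posts S11 := by
        rw [is_bot, if_neg (by simp [hallf]), ← hpostsdef]
        simp only []
        rw [hm0]
        show (if min m0 mx < 10 + 1 then false
          else botLoopA posts PySem.Set.empty (PySem.List.pyRange (min m0 mx) 10 (-1))) = botCheckA posts S11
        rw [if_neg (by omega)]
        rw [loopA_eq_any posts q0 qs0 hq _ PySem.Set.empty (botCheckA_nil _)]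
        rw [Bool.eq_iff_iff, List.any_eq_true]
        constructor
        · rintro ⟨k, hkmem, htr⟩
          rw [PySem.List.mem_pyRange_neg_one] at hkmem
          have := mono_trigger posts q0 qs0 hq k (by omega)
            (fun q hq' => le_trans (le_trans hkmem.2 (min_le_left _ _)) (hlenq q hq')) htr
          rwa [hS11, Option.getD_some] at this
        · intro h
          refine ⟨11, PySem.List.mem_pyRange_neg_one.mpr ⟨by omega, by omega⟩, ?_⟩
          rw [hS11, Option.getD_some]; exact h
      have hBne : ¬ (r.all (fun post => post == f) = true) := by
        rw [all_flip]
        intro hc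
        have : allEqualA (f :: r) = true := by simpa [allEqualA] using hc
        rw [hallf] at this; exact absurd this (by simp)
      have hB : is_bot_alt (f :: r) mpl mx = (posts.any fun post =>
          PySem.Set.contains S11 (PySem.Str.slice post none (some 11)) ||
          PySem.Set.contains S11 (PySem.Str.slice post (some (-11)) none)) := by
        simp only [is_bot_alt]
        rw [if_neg hBne, ← hpostsdef, if_neg (by simp [hq]; omega), hS11]
      rw [hA, hB]
      exact check11_eq_B posts q0 qs0 hq h11len S11 hS11

-- ===== VERDICT (by name: the statement is the Claim_ definition above) =====
theorem is_bot_spec : Claim_equal_is_bot := by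
  intro bp mpl mx _ hpre
  exact is_bot_main bp mpl mx hpre
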